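-- pv_equiv track=rewrite | github.com/HammadYasin/OOS-Analysis-Bot | oos_bot.py | allocate_batches
-- ===== SOURCE A (Python) =====
-- class Batch:
--     def __init__(self, quantity, expiry_date):
--         self.quantity = quantity
--         self.expiry_date = expiry_date
--
-- def allocate_batches(total_quantity, available_quantity, expiry_dates):
--     batches = []
--     for quantity, expiry_date in zip(total_quantity, expiry_dates):
--         batches.append(Batch(quantity, expiry_date))
--
--     # sort the batches by expiry date
--     batches.sort(key=lambda batch: batch.expiry_date)
--
--     # allocate batches until all available quantity is used
--     allocation = []
--     for batch in batches:
--         if available_quantity > 0: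
--             if batch.quantity <= available_quantity:
--                 allocation.append(batch.quantity)
--                 available_quantity -= batch.quantity
--             else:
--                 allocation.append(available_quantity)
--                 available_quantity = 0
--         else:
--             allocation.append(0)
--
--     return allocation
-- ===== SOURCE B (Python) =====
-- def allocate_batches(total_quantity, available_quantity, expiry_dates):
--     # sort the (quantity, expiry) pairs by expiry date (stable, like A's Batch sort)
--     qs = [q for q, _ in sorted(zip(total_quantity, expiry_dates), key=lambda p: p[1])]
--     n = len(qs)
--
--     # prefix[i] = sum of the first i sorted quantities
--     prefix = [0]
--     running = 0
--     for q in qs: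
--         running += q
--         prefix.append(running)
--
--     # k = first index where the greedy full allocation breaks:
--     # either nothing is left (prefix[i] >= available) or the batch does
--     # not fit entirely (prefix[i+1] > available)
--     k = _first_break(prefix, available_quantity, n)
--
--     # batches before k are taken in full, batch k (if any) gets the
--     # clamped remainder, everything after gets 0
--     result = qs[:k]
--     if k < n:
--         result.append(max(available_quantity - prefix[k], 0))
--         result.extend([0] * (n - k - 1))
--     return result
--
-- def _first_break(prefix, available_quantity, n):
--     for i in range(n):
--         if prefix[i] >= available_quantity or prefix[i + 1] > available_quantity:
--             return i
--     return n
-- ===== Notes on version B (the rewrite author's own statement) =====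
-- stated objective: alternative
-- what changed: Replaces the loop that threads a mutable decrementing 'available_quantity' accumulator with a prefix-sum table plus a single break-index search: the output is the sorted quantities up to the break index, one clamped remainder, and zeros.
import Mathlib
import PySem

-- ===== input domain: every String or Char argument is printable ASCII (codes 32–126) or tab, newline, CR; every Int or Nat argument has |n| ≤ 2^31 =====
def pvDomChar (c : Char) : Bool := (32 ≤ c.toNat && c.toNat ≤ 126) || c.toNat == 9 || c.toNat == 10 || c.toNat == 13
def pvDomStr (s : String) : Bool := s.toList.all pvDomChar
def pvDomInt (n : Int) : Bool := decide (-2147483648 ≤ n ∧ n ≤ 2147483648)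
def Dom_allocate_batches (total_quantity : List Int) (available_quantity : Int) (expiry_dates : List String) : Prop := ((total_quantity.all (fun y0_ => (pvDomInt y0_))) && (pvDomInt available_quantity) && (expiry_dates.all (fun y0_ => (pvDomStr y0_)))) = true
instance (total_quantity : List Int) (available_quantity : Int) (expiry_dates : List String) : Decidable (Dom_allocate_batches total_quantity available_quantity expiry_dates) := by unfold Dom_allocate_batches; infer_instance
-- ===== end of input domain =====

-- B replaces A's loop threading a mutable decrementing `available_quantity` by a prefix-sum
-- table plus a break-index search (alternative decomposition, same asymptotic cost).

-- ===== PORT A =====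
-- Batch(quantity, expiry_date) is represented as the pair (Int × String).
def allocate_batches (total_quantity : List Int) (available_quantity : Int) (expiry_dates : List String) : List Int :=
  let batches := total_quantity.zip expiry_dates
  let batches := PySem.List.sorted batches (fun b => b.2) false
  (batches.foldl (fun (st : List Int × Int) b =>
      if st.2 > 0 then
        if b.1 ≤ st.2 then (st.1 ++ [b.1], st.2 - b.1)
        else (st.1 ++ [st.2], (0 : Int))
      else (st.1 ++ [(0 : Int)], st.2)) ([], available_quantity)).1

-- ===== PORT B =====
-- prefix list built by the Source B loop: state = (prefix list, running total)
def pvPrefixB (qs : List Int) : List Int × Int :=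
  qs.foldl (fun (st : List Int × Int) q => (st.1 ++ [st.2 + q], st.2 + q)) ([0], 0)

-- port of _first_break: `for i in range(n): if …: return i` as countdown recursion, i counts up
-- (prefix accesses are always in range here, so getD is exact for prefix[i])
def pvFirstBreak (pre : List Int) (a : Int) : Nat → Nat → Nat
  | i, 0 => i
  | i, fuel+1 =>
    if pre.getD i 0 ≥ a ∨ pre.getD (i+1) 0 > a then i
    else pvFirstBreak pre a (i+1) fuel

-- body of Source B after qs is formed (qs[:k] with k ≥ 0 is List.take)
def pvCoreB (qs : List Int) (a : Int) : List Int :=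
  let n := qs.length
  let pre := (pvPrefixB qs).1
  let k := pvFirstBreak pre a 0 n
  if k < n then qs.take k ++ (max (a - pre.getD k 0) 0 :: List.replicate (n - k - 1) 0)
  else qs.take k

def allocate_batches_alt (total_quantity : List Int) (available_quantity : Int) (expiry_dates : List String) : List Int :=
  let qs := (PySem.List.sorted (total_quantity.zip expiry_dates) (fun p => p.2) false).map (fun p => p.1)
  pvCoreB qs available_quantity

-- ===== PRECONDITION & SPEC =====
def Spec_allocate_batches (total_quantity : List Int) (available_quantity : Int) (expiry_dates : List String) (out : List Int) : Prop := out = allocate_batches_alt total_quantity available_quantity expiry_dates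
instance (total_quantity : List Int) (available_quantity : Int) (expiry_dates : List String) (out : List Int) : Decidable (Spec_allocate_batches total_quantity available_quantity expiry_dates out) := by unfold Spec_allocate_batches; infer_instance

-- ===== CLAIM (what is proved, stated in full; the proofs are below) =====
def Claim_equal_allocate_batches : Prop := ∀ (total_quantity : List Int) (available_quantity : Int) (expiry_dates : List String), Dom_allocate_batches total_quantity available_quantity expiry_dates → Spec_allocate_batches total_quantity available_quantity expiry_dates (allocate_batches total_quantity available_quantity expiry_dates)

-- ===== LEMMAS AND PROOFS =====

-- recursive reading of A's allocation loop (quantities only)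
def recA : List Int → Int → List Int
  | [], _ => []
  | q :: qs, r =>
    if r > 0 then
      if q ≤ r then q :: recA qs (r - q) else r :: recA qs 0
    else 0 :: recA qs r

lemma foldA_eq (bs : List (Int × String)) : ∀ (acc : List Int) (r : Int),
    (bs.foldl (fun (st : List Int × Int) b =>
      if st.2 > 0 then
        if b.1 ≤ st.2 then (st.1 ++ [b.1], st.2 - b.1)
        else (st.1 ++ [st.2], (0 : Int))
      else (st.1 ++ [(0 : Int)], st.2)) (acc, r)).1 = acc ++ recA (bs.map Prod.fst) r := by
  induction bs with
  | nil => intro acc r; simp [recA]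
  | cons b bs ih =>
    intro acc r
    simp only [List.foldl_cons, List.map_cons, recA]
    by_cases h1 : r > 0
    · by_cases h2 : b.1 ≤ r
      · simp [h1, h2, ih, List.append_assoc]
      · simp [h1, h2, ih, List.append_assoc]
    · simp [h1, ih, List.append_assoc]

-- pure prefix tails: P c qs = partial sums starting from c (without the leading c)
def pvP : Int → List Int → List Int
  | _, [] => []
  | c, q :: qs => (c + q) :: pvP (c + q) qs

lemma pvP_length : ∀ (qs : List Int) (c : Int), (pvP c qs).length = qs.length := by
  intro qs
  induction qs with
  | nil => intro c; rfl
  | cons q qs ih => intro c; simp [pvP, ih]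

lemma pvP_shift : ∀ (qs : List Int) (c d : Int), pvP (d + c) qs = (pvP c qs).map (d + ·) := by
  intro qs
  induction qs with
  | nil => intro c d; rfl
  | cons q qs ih =>
    intro c d
    simp only [pvP, List.map_cons]
    congr 1
    · ring
    · rw [show d + c + q = d + (c + q) by ring, ih]

lemma pvPrefixB_fold (qs : List Int) : ∀ (acc : List Int) (c : Int),
    qs.foldl (fun (st : List Int × Int) q => (st.1 ++ [st.2 + q], st.2 + q)) (acc, c)
      = (acc ++ pvP c qs, c + qs.sum) := by
  induction qs with
  | nil => intro acc c; simp [pvP]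
  | cons q qs ih =>
    intro acc c
    simp only [List.foldl_cons, pvP, List.sum_cons]
    rw [ih]
    congr 1
    · simp
    · ring

lemma pvPrefixB_eq (qs : List Int) : (pvPrefixB qs).1 = 0 :: pvP 0 qs := by
  simp [pvPrefixB, pvPrefixB_fold]

lemma getD_map_add (l : List Int) (q : Int) (i : Nat) (h : i < l.length) :
    (l.map (q + ·)).getD i 0 = q + l.getD i 0 := by
  rw [List.getD_eq_getElem?_getD, List.getD_eq_getElem?_getD, List.getElem?_map,
      List.getElem?_eq_getElem h]
  simp

lemma fb_le (pre : List Int) (a : Int) : ∀ (fuel i : Nat), pvFirstBreak pre a i fuel ≤ i + fuel := by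
  intro fuel
  induction fuel with
  | zero => intro i; simp [pvFirstBreak]
  | succ fuel ih =>
    intro i
    rw [pvFirstBreak]
    split
    · omega
    · have := ih (i + 1); omega

lemma fb_shift (pre : List Int) (q a : Int) : ∀ (fuel i : Nat), i + fuel < pre.length →
    pvFirstBreak (0 :: pre.map (q + ·)) a (i+1) fuel = 1 + pvFirstBreak pre (a - q) i fuel := by
  intro fuel
  induction fuel with
  | zero => intro i _; simp [pvFirstBreak]; omega
  | succ fuel ih =>
    intro i hlen
    rw [pvFirstBreak, pvFirstBreak]
    have h1 : i < pre.length := by omega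
    have h2 : i + 1 < pre.length := by omega
    have e1 : (0 :: pre.map (q + ·)).getD (i+1) 0 = q + pre.getD i 0 := by
      simpa using getD_map_add pre q i h1
    have e2 : (0 :: pre.map (q + ·)).getD (i+1+1) 0 = q + pre.getD (i+1) 0 := by
      simpa using getD_map_add pre q (i+1) h2
    rw [e1, e2]
    by_cases hc : pre.getD i 0 ≥ a - q ∨ pre.getD (i+1) 0 > a - q
    · rw [if_pos hc, if_pos (by omega)]
      omega
    · rw [if_neg hc, if_neg (by omega), ih (i+1) (by omega)]

lemma recA_zeros : ∀ (qs : List Int) (r : Int), r ≤ 0 → recA qs r = List.replicate qs.length 0 := by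
  intro qs
  induction qs with
  | nil => intro r _; rfl
  | cons q qs ih =>
    intro r hr
    rw [recA, if_neg (by omega), ih r hr]
    simp [List.replicate_succ]

lemma recA_eq_coreB : ∀ (qs : List Int) (a : Int), recA qs a = pvCoreB qs a := by
  intro qs
  induction qs with
  | nil => intro a; rfl
  | cons q qs ih =>
    intro a
    have hpre : (pvPrefixB (q :: qs)).1 = 0 :: ((0 :: pvP 0 qs).map (q + ·)) := by
      rw [pvPrefixB_eq]
      simp only [pvP, List.map_cons]
      rw [show (0:Int) + q = q + 0 by ring, pvP_shift]
    have hlenT : (0 :: pvP 0 qs).length = qs.length + 1 := by simp [pvP_length]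
    simp only [pvCoreB, List.length_cons, hpre]
    rw [pvFirstBreak]
    have e0 : (0 :: (0 :: pvP 0 qs).map (q + ·)).getD 0 0 = (0 : Int) := rfl
    have e1 : (0 :: (0 :: pvP 0 qs).map (q + ·)).getD (0+1) 0 = q := by
      have h := getD_map_add (0 :: pvP 0 qs) q 0 (by simp)
      simpa using h
    rw [e0, e1]
    by_cases hc : (0:Int) ≥ a ∨ q > a
    · -- break at index 0: allocation is max(a,0) then zeros
      rw [if_pos hc, if_pos (Nat.succ_pos _)]
      rw [show qs.length + 1 - 0 - 1 = qs.length by omega]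
      simp only [List.take_zero, List.nil_append, e0]
      rw [recA]
      by_cases h1 : a > 0
      · have h2 : ¬ q ≤ a := by omega
        rw [if_pos h1, if_neg h2, recA_zeros qs 0 (by omega)]
        rw [show max (a - 0) 0 = a by omega]
      · rw [if_neg h1, recA_zeros qs a (by omega)]
        rw [show max (a - 0) 0 = 0 by omega]
    · -- batch 0 fully allocated: recurse with a - q
      rw [if_neg hc]
      rw [fb_shift (0 :: pvP 0 qs) q a qs.length 0 (by omega)]
      have hk := fb_le (0 :: pvP 0 qs) (a - q) qs.length 0
      set k := pvFirstBreak (0 :: pvP 0 qs) (a - q) 0 qs.length with hkdef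
      rw [show 1 + k = k + 1 by omega]
      have hgd : (0 :: (0 :: pvP 0 qs).map (q + ·)).getD (k + 1) 0
          = q + (0 :: pvP 0 qs).getD k 0 := by
        have h := getD_map_add (0 :: pvP 0 qs) q k (by omega)
        simpa using h
      rw [recA, if_pos (by omega : a > 0), if_pos (by omega : q ≤ a), ih (a - q)]
      simp only [pvCoreB, pvPrefixB_eq, ← hkdef]
      by_cases hlt : k < qs.length
      · rw [if_pos (by omega : k + 1 < qs.length + 1), if_pos hlt, hgd,
            List.take_succ_cons,
            show qs.length + 1 - (k + 1) - 1 = qs.length - k - 1 by omega,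
            show a - (q + (0 :: pvP 0 qs).getD k 0) = a - q - (0 :: pvP 0 qs).getD k 0 by ring]
        simp
      · rw [if_neg (by omega : ¬ k + 1 < qs.length + 1), if_neg hlt, List.take_succ_cons]

-- ===== VERDICT (by name: the statement is the Claim_ definition above) =====
theorem allocate_batches_spec : Claim_equal_allocate_batches := by
  intro tq av ed _
  show allocate_batches tq av ed = allocate_batches_alt tq av ed
  simp only [allocate_batches, allocate_batches_alt]
  rw [foldA_eq, recA_eq_coreB]
  rfl
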